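-- pv_equiv track=rewrite | github.com/FarukHammoud/AjustePolinomio | lib.py | GeraPolinomio
-- ===== SOURCE A (Python) =====
-- def MultiplicaPolinomios(poli_1 = [0],poli_2 = [0]): #coeficientes de traz pra frente: 1 + 2x +3x^2 -> [1,2,3]
--     novo_poli = []
--     for i in range(len(poli_1)+len(poli_2)):
--         novo_poli.append(0)
--     for i in range(len(poli_1)):
--         for j in range(len(poli_2)):
--             novo_poli[i+j] += (poli_1[i]*poli_2[j])
--     return novo_poli
--
-- def GeraPolinomio(raizes = []):
--     polinomio = [1]
--     for raiz in raizes: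
--         polinomio = MultiplicaPolinomios(polinomio,[-raiz,1])
--     for i in range(len(polinomio)-1,0,-1):
--         if polinomio[i] == 0:
--             polinomio.pop(i)
--         else: break
--     return polinomio
-- ===== SOURCE B (Python) =====
-- def GeraPolinomio(raizes = []):
--     # Divide and conquer: split the roots in half, build each half's polynomial
--     # recursively, and convolve the two halves (instead of A's linear fold that
--     # multiplies by one (x - r) factor at a time and then trims trailing zeros).
--     if not raizes:
--         return [1]
--     return _prod(raizes)
--
-- def _padAdd(u, v):
--     if len(u) < len(v):
--         u, v = v, u
--     return [x + y for x, y in zip(u, v)] + u[len(v):]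
--
-- def _conv(p, q):
--     out = []
--     for a in reversed(p):
--         out = _padAdd([a * b for b in q], [0] + out)
--     return out
--
-- def _prod(rs):
--     if len(rs) == 1:
--         return [-rs[0], 1]
--     mid = len(rs) // 2
--     return _conv(_prod(rs[:mid]), _prod(rs[mid:]))
-- ===== Notes on version B (the rewrite author's own statement) =====
-- stated objective: alternative
-- what changed: B builds the polynomial by divide and conquer: it recursively computes the product polynomial of each half of the root list and convolves the two halves, instead of A's linear left-to-right fold multiplying by one padded (x - r) factor at a time followed by a trailing-zero trimming pass.
import Mathlib
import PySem

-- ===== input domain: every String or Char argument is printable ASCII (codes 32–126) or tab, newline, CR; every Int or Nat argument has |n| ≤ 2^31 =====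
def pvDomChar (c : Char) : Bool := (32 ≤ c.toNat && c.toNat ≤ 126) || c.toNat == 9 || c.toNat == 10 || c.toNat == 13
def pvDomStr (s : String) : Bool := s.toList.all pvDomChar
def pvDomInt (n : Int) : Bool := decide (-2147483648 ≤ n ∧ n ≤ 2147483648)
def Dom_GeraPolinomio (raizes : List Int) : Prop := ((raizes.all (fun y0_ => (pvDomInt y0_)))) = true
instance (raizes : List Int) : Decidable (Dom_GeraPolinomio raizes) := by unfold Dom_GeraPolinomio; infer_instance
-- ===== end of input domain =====

-- B replaces A's linear fold (multiply by one padded (x-r) factor at a time, then trim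
-- trailing zeros) by a divide-and-conquer product over the root list (objective: alternative).

-- ===== PORT A =====
def MultiplicaPolinomios (poli_1 poli_2 : List Int) : List Int :=
  let novo := (PySem.List.pyRange 0 ((poli_1.length : Int) + (poli_2.length : Int)) 1).foldl
      (fun acc _ => acc ++ [(0 : Int)]) []
  (PySem.List.pyRange 0 (poli_1.length : Int) 1).foldl (fun novo i =>
    (PySem.List.pyRange 0 (poli_2.length : Int) 1).foldl (fun novo j =>
      PySem.List.pySetD novo (i + j)
        (PySem.List.pyGetD novo (i + j) 0 +
          PySem.List.pyGetD poli_1 i 0 * PySem.List.pyGetD poli_2 j 0)) novo) novo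

-- A's trailing loop `for i in range(len(p)-1, 0, -1): if p[i]==0: p.pop(i) else: break`;
-- the index i is always in range here, so p[i] = pyGetD p i 0 and p.pop(i) = p.eraseIdx i (exact)
def trimGera : List Int → Nat → List Int
  | p, 0 => p
  | p, Nat.succ k =>
    if PySem.List.pyGetD p ((Nat.succ k : Nat) : Int) 0 = 0 then
      trimGera (p.eraseIdx (Nat.succ k)) k
    else p

def GeraPolinomio (raizes : List Int) : List Int :=
  let polinomio := raizes.foldl (fun pol raiz => MultiplicaPolinomios pol [-raiz, 1]) [1]
  trimGera polinomio (polinomio.length - 1)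

-- ===== PORT B =====
-- `if len(u) < len(v): u, v = v, u; return [x+y for x,y in zip(u,v)] + u[len(v):]`
def padAddB (u v : List Int) : List Int :=
  if u.length < v.length then List.zipWith (fun x y => x + y) v u ++ v.drop u.length
  else List.zipWith (fun x y => x + y) u v ++ u.drop v.length

-- `out = []; for a in reversed(p): out = padAdd([a*b for b in q], [0] + out)`
def convB (p q : List Int) : List Int :=
  p.reverse.foldl (fun out a => padAddB (q.map (fun b => a * b)) (0 :: out)) []

-- `_prod(rs)`; the slices rs[:mid], rs[mid:] with 0 ≤ mid ≤ len(rs) are take/drop (exact)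
def prodTreeB : List Int → List Int
  | [] => [1]          -- unreachable from GeraPolinomio_alt (guarded by the empty check)
  | [r] => [-r, 1]
  | r1 :: r2 :: t =>
    convB (prodTreeB ((r1 :: r2 :: t).take ((r1 :: r2 :: t).length / 2)))
          (prodTreeB ((r1 :: r2 :: t).drop ((r1 :: r2 :: t).length / 2)))
termination_by rs => rs.length
decreasing_by
  · simp; omega
  · simp; omega

def GeraPolinomio_alt (raizes : List Int) : List Int :=
  match raizes with
  | [] => [1]
  | _ => prodTreeB raizes

-- ===== PRECONDITION & SPEC =====
def Spec_GeraPolinomio (raizes : List Int) (out : List Int) : Prop := out = GeraPolinomio_alt raizes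
instance (raizes : List Int) (out : List Int) : Decidable (Spec_GeraPolinomio raizes out) := by unfold Spec_GeraPolinomio; infer_instance

-- ===== CLAIM (what is proved, stated in full; the proofs are below) =====
def Claim_equal_GeraPolinomio : Prop := ∀ (raizes : List Int), Dom_GeraPolinomio raizes → Spec_GeraPolinomio raizes (GeraPolinomio raizes)

-- ===== LEMMAS AND PROOFS =====

-- ---------- A-side: A's fold-and-trim equals `foldl stepB [1]` ----------

-- B's one step (multiply the coefficient list by (x - r)) as used to characterise A
def stepB (c : List Int) (r : Int) : List Int :=
  List.zipWith (fun a b => a - r * b) (0 :: c) (c ++ [0])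

-- the value sequence produced by A's double-update loop, as a structural recursion
def convLin (r : Int) : List Int → Int → List Int
  | [], v => [v]
  | a :: t, v => (v + a * (-r)) :: convLin r t (a * 1)

lemma pyGetD_append_cons (pre rest : List Int) (x d : Int) :
    PySem.List.pyGetD (pre ++ x :: rest) ((pre.length : Int)) d = x := by
  rw [PySem.List.pyGetD_natCast]; simp

lemma pySetD_append_cons (pre rest : List Int) (x v : Int) :
    PySem.List.pySetD (pre ++ x :: rest) ((pre.length : Int)) v = pre ++ v :: rest := by
  rw [PySem.List.pySetD_natCast]; simp [List.set_append_right]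

lemma pyGetD_append_cons2 (pre : List Int) (w x : Int) (rest : List Int) (d : Int) :
    PySem.List.pyGetD (pre ++ w :: x :: rest) ((pre.length : Int) + 1) d = x := by
  rw [show ((pre.length : Int) + 1) = (((pre ++ [w]).length : Int)) from by simp,
    show pre ++ w :: x :: rest = (pre ++ [w]) ++ x :: rest from by simp,
    pyGetD_append_cons]

lemma pySetD_append_cons2 (pre : List Int) (w x : Int) (rest : List Int) (v : Int) :
    PySem.List.pySetD (pre ++ w :: x :: rest) ((pre.length : Int) + 1) v = pre ++ w :: v :: rest := by
  rw [show ((pre.length : Int) + 1) = (((pre ++ [w]).length : Int)) from by simp,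
    show pre ++ w :: x :: rest = (pre ++ [w]) ++ x :: rest from by simp,
    pySetD_append_cons]
  simp

lemma pyr2 : PySem.List.pyRange 0 2 1 = [0, 1] := by decide
lemma hr (r : Int) : PySem.List.pyRange 0 (([-r, 1] : List Int).length : Int) 1 = [0, 1] := by
  norm_num [pyr2]
lemma pg0 (r : Int) : PySem.List.pyGetD ([-r, 1] : List Int) 0 0 = -r := by
  simp [PySem.List.pyGetD_ofNat']
lemma pg1 (r : Int) : PySem.List.pyGetD ([-r, 1] : List Int) 1 0 = 1 := by
  simp [PySem.List.pyGetD_ofNat']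

lemma mult_loop_inv (r : Int) : ∀ (c pre : List Int) (v : Int) (extra : List Int),
    (PySem.List.enumerate c (pre.length : Int)).foldl
      (fun novo ia =>
        (PySem.List.pyRange 0 (([-r, 1] : List Int).length : Int) 1).foldl (fun novo j =>
          PySem.List.pySetD novo (ia.1 + j)
            (PySem.List.pyGetD novo (ia.1 + j) 0 +
              ia.2 * PySem.List.pyGetD ([-r, 1] : List Int) j 0)) novo)
      (pre ++ v :: List.replicate c.length 0 ++ extra)
    = pre ++ convLin r c v ++ extra := by
  intro c
  induction c with
  | nil => intro pre v extra; simp [convLin]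
  | cons a t ih =>
    intro pre v extra
    rw [PySem.List.enumerate_cons]
    simp only [hr]
    simp only [List.foldl_cons, List.foldl_nil, add_zero, pg0, pg1,
      List.length_cons, List.replicate_succ, List.append_assoc, List.cons_append]
    rw [pyGetD_append_cons, pySetD_append_cons, pyGetD_append_cons2, pySetD_append_cons2]
    simp only [zero_add]
    have H := ih (pre ++ [v + a * -r]) (a * 1) extra
    simp only [hr] at H
    simp only [List.foldl_cons, List.foldl_nil, add_zero, zero_add, pg0, pg1,
      List.append_assoc, List.cons_append, List.nil_append, List.length_append,
      List.length_cons, List.length_nil, Nat.cast_add, Nat.cast_one] at H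
    rw [H]
    simp [convLin]

lemma rep_build (n : Nat) :
    (PySem.List.pyRange 0 (n : Int) 1).foldl (fun acc _ => acc ++ [(0 : Int)]) []
      = List.replicate n 0 := by
  induction n with
  | zero => simp
  | succ k ih =>
    rw [show (((k+ 1 : Nat)) : Int) = (k : Int) + 1 from by push_cast; ring]
    rw [PySem.List.pyRange_one_succ_right (by positivity)]
    rw [List.foldl_append, ih]
    simp [← List.replicate_succ']

lemma mult_loop_inv0 (r : Int) (c : List Int) :
    (PySem.List.pyRange 0 (c.length : Int) 1).foldl
      (fun novo i =>
        (PySem.List.pyRange 0 (([-r, 1] : List Int).length : Int) 1).foldl (fun novo j =>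
          PySem.List.pySetD novo (i + j)
            (PySem.List.pyGetD novo (i + j) 0 +
              PySem.List.pyGetD c i 0 * PySem.List.pyGetD ([-r, 1] : List Int) j 0)) novo)
      (List.replicate (c.length + 2) 0)
    = convLin r c 0 ++ [0] := by
  have h := mult_loop_inv r c [] 0 [0]
  simp only [List.length_nil, Nat.cast_zero, List.nil_append] at h
  rw [show ((0:Int) :: List.replicate c.length 0) ++ [0] = List.replicate (c.length + 2) 0 from by
        rw [← List.replicate_succ, ← List.replicate_succ']] at h
  rw [PySem.List.enumerate_eq_map_pyRange c 0, List.foldl_map] at h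
  exact h

lemma convLin_eq_zip (r : Int) : ∀ (c : List Int) (v : Int),
    convLin r c v = List.zipWith (fun a b => a - r * b) (v :: c) (c ++ [0]) := by
  intro c
  induction c with
  | nil => intro v; simp [convLin]
  | cons a t ih =>
    intro v
    simp only [convLin, ih, mul_one, List.cons_append, List.zipWith_cons_cons]
    congr 1
    ring

lemma mult_eq_stepB (r : Int) (c : List Int) :
    MultiplicaPolinomios c [-r, 1] = stepB c r ++ [0] := by
  unfold MultiplicaPolinomios
  rw [show ((c.length : Int) + (([-r, 1] : List Int).length : Int)) = ((c.length + 2 : Nat) : Int) from by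
        push_cast; simp]
  rw [rep_build, mult_loop_inv0, convLin_eq_zip]
  rfl

lemma zipZeros (r : Int) : ∀ (j : Nat) (x : Int),
    List.zipWith (fun a b => a - r * b) (x :: List.replicate j 0) (List.replicate j 0 ++ [0])
      = (x - r * 0) :: List.replicate j 0 := by
  intro j
  induction j with
  | zero => intro x; simp
  | succ k ih =>
    intro x
    simp only [List.replicate_succ, List.cons_append, List.zipWith_cons_cons, ih]
    simp

lemma stepB_append_zero (r : Int) : ∀ (b : List Int) (j : Nat) (x : Int),
    List.zipWith (fun a b => a - r * b) (x :: (b ++ List.replicate j 0)) ((b ++ List.replicate j 0) ++ [0])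
      = List.zipWith (fun a b => a - r * b) (x :: b) (b ++ [0]) ++ List.replicate j 0 := by
  intro b
  induction b with
  | nil => intro j x; simp [zipZeros]
  | cons a t ih =>
    intro j x
    simp only [List.cons_append, List.zipWith_cons_cons]
    rw [ih]

lemma stepB_zeros (r : Int) (b : List Int) (j : Nat) :
    stepB (b ++ List.replicate j 0) r = stepB b r ++ List.replicate j 0 :=
  stepB_append_zero r b j 0

lemma fold_inv : ∀ (l : List Int) (b : List Int) (j : Nat),
    l.foldl (fun pol raiz => MultiplicaPolinomios pol [-raiz, 1]) (b ++ List.replicate j 0)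
      = l.foldl stepB b ++ List.replicate (j + l.length) 0 := by
  intro l
  induction l with
  | nil => intro b j; simp
  | cons r l' ih =>
    intro b j
    simp only [List.foldl_cons]
    rw [mult_eq_stepB, stepB_zeros]
    rw [show (stepB b r ++ List.replicate j 0) ++ [0] = stepB b r ++ List.replicate (j + 1) 0 from by
          simp [List.replicate_succ']]
    rw [ih]
    congr 2
    simp
    omega

lemma stepB_monic (r : Int) (b' : List Int) :
    stepB (b' ++ [1]) r = List.zipWith (fun a b => a - r * b) (0 :: b') (b' ++ [1]) ++ [1] := by
  unfold stepB
  rw [show (0 : Int) :: (b' ++ [1]) = (0 :: b') ++ [1] from by simp]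
  rw [List.zipWith_append (by simp)]
  simp

lemma foldB_monic : ∀ (l : List Int) (b' : List Int),
    ∃ b'', l.foldl stepB (b' ++ [1]) = b'' ++ [1] := by
  intro l
  induction l with
  | nil => intro b'; exact ⟨b', rfl⟩
  | cons r l' ih =>
    intro b'
    rw [List.foldl_cons, stepB_monic]
    exact ih _

lemma erase_last : ∀ (l : List Int) (x : Int), (l ++ [x]).eraseIdx l.length = l := by
  intro l
  induction l with
  | nil => intro x; rfl
  | cons a t ih => intro x; simp only [List.cons_append, List.length_cons, List.eraseIdx_cons_succ, ih]

lemma trim_zeros : ∀ (n : Nat) (b'' : List Int),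
    trimGera ((b'' ++ [1]) ++ List.replicate n 0) (b''.length + n) = b'' ++ [1] := by
  intro n
  induction n with
  | zero =>
    intro b''
    simp only [List.replicate_zero, List.append_nil, Nat.add_zero]
    rcases hn : b''.length with _ | k
    · rfl
    · simp only [trimGera]
      rw [show (((k + 1 : Nat)) : Int) = ((b''.length : Nat) : Int) from by rw [hn],
          pyGetD_append_cons]
      simp
  | succ m ih =>
    intro b''
    have hsh : (b'' ++ [1]) ++ List.replicate (m + 1) (0 : Int)
        = ((b'' ++ [1]) ++ List.replicate m 0) ++ [0] := by
      simp [List.replicate_succ']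
    have hidx : b''.length + (m + 1) = Nat.succ (b''.length + m) := by omega
    rw [hsh, hidx]
    simp only [trimGera]
    rw [show ((Nat.succ (b''.length + m) : Nat) : Int)
          = ((((b'' ++ [1]) ++ List.replicate m 0).length : Nat) : Int) from by simp; omega]
    rw [show ((b'' ++ [1]) ++ List.replicate m 0) ++ [0]
          = ((b'' ++ [1]) ++ List.replicate m 0) ++ 0 :: [] from rfl,
        pyGetD_append_cons]
    rw [if_pos rfl]
    rw [show Nat.succ (b''.length + m) = ((b'' ++ [1]) ++ List.replicate m 0).length from by
          simp; omega]
    rw [show (((b'' ++ [1]) ++ List.replicate m 0) ++ 0 :: [])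
          = (((b'' ++ [1]) ++ List.replicate m 0) ++ [0]) from rfl,
        erase_last]
    exact ih b''

lemma A_eq_fold (raizes : List Int) : GeraPolinomio raizes = raizes.foldl stepB [1] := by
  show trimGera _ _ = _
  have hfold : raizes.foldl (fun pol raiz => MultiplicaPolinomios pol [-raiz, 1]) [1]
      = raizes.foldl stepB [1] ++ List.replicate raizes.length 0 := by
    have h := fold_inv raizes [1] 0
    simpa using h
  obtain ⟨b'', hb⟩ := foldB_monic raizes []
  simp only [List.nil_append] at hb
  rw [hfold, hb]
  have hlen : ((b'' ++ [1]) ++ List.replicate raizes.length (0 : Int)).length - 1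
      = b''.length + raizes.length := by simp
  rw [hlen, trim_zeros, ← hb]

-- ---------- B-side: convolution algebra and the divide-and-conquer product ----------

-- ragged (length-padding) pointwise addition, the structural form of padAddB
def ragg : List Int → List Int → List Int
  | [], v => v
  | u, [] => u
  | a :: u, b :: v => (a + b) :: ragg u v

-- structural form of convB
def cv (p q : List Int) : List Int :=
  p.foldr (fun a out => ragg (q.map (fun b => a * b)) (0 :: out)) []

lemma ragg_nil_right (u : List Int) : ragg u [] = u := by cases u <;> rfl

lemma ragg_length : ∀ (u v : List Int), (ragg u v).length = max u.length v.length := by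
  intro u
  induction u with
  | nil => intro v; simp [ragg]
  | cons a u' ih =>
    intro v
    cases v with
    | nil => simp [ragg]
    | cons b v' =>
      simp only [ragg, List.length_cons, ih]
      omega

lemma ragg_comm : ∀ (u v : List Int), ragg u v = ragg v u := by
  intro u
  induction u with
  | nil => intro v; simp [ragg, ragg_nil_right]
  | cons a u' ih =>
    intro v
    cases v with
    | nil => rfl
    | cons b v' => simp [ragg, ih, add_comm]

lemma zip_drop_ragg : ∀ (u v : List Int), v.length ≤ u.length →
    List.zipWith (fun x y => x + y) u v ++ u.drop v.length = ragg u v := by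
  intro u
  induction u with
  | nil =>
    intro v hv
    cases v with
    | nil => rfl
    | cons b v' => simp at hv
  | cons a u' ih =>
    intro v hv
    cases v with
    | nil => simp [ragg_nil_right]
    | cons b v' =>
      simp only [List.zipWith_cons_cons, List.cons_append, List.length_cons, List.drop_succ_cons, ragg]
      rw [ih v' (by simpa using hv)]

lemma padAddB_eq_ragg (u v : List Int) : padAddB u v = ragg u v := by
  unfold padAddB
  split_ifs with h
  · rw [zip_drop_ragg v u (by omega), ragg_comm]
  · exact zip_drop_ragg u v (by omega)

lemma convB_eq_cv (p q : List Int) : convB p q = cv p q := by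
  unfold convB cv
  rw [List.foldl_reverse]
  induction p with
  | nil => rfl
  | cons a t ih => simp only [List.foldr_cons, padAddB_eq_ragg]

lemma ragg_assoc : ∀ (u v w : List Int), ragg (ragg u v) w = ragg u (ragg v w) := by
  intro u
  induction u with
  | nil => intro v w; simp [ragg]
  | cons a u' ih =>
    intro v
    cases v with
    | nil => intro w; simp [ragg]
    | cons b v' =>
      intro w
      cases w with
      | nil => simp [ragg, ragg_nil_right]
      | cons c w' => simp [ragg, ih, add_assoc]

lemma ragg_rep_zero_left : ∀ (n : Nat) (v : List Int), n ≤ v.length →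
    ragg (List.replicate n 0) v = v := by
  intro n
  induction n with
  | zero => intro v _; simp [ragg]
  | succ m ih =>
    intro v hv
    cases v with
    | nil => simp at hv
    | cons b v' =>
      simp only [List.replicate_succ, ragg, zero_add]
      rw [ih v' (by simpa using hv)]

lemma ragg_rep_zero_right (n : Nat) (v : List Int) (h : n ≤ v.length) :
    ragg v (List.replicate n 0) = v := by
  rw [ragg_comm]; exact ragg_rep_zero_left n v h

lemma cv_cons (a : Int) (p q : List Int) :
    cv (a :: p) q = ragg (q.map (fun b => a * b)) (0 :: cv p q) := rfl

lemma cv_length : ∀ (p q : List Int), p ≠ [] → q ≠ [] →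
    (cv p q).length = p.length + q.length - 1 := by
  intro p
  induction p with
  | nil => intro q h; exact absurd rfl h
  | cons a p' ih =>
    intro q _ hq
    rw [cv_cons, ragg_length]
    cases p' with
    | nil =>
      simp only [cv, List.foldr_nil, List.length_cons, List.length_nil, List.length_map]
      have : 1 ≤ q.length := by cases q with | nil => exact absurd rfl hq | cons _ _ => simp
      omega
    | cons b p'' =>
      have h := ih q (by simp) hq
      have : 1 ≤ q.length := by cases q with | nil => exact absurd rfl hq | cons _ _ => simp
      simp only [List.length_cons, List.length_map, h]
      omega

lemma cv_ne_nil (p q : List Int) (hp : p ≠ []) (hq : q ≠ []) : cv p q ≠ [] := by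
  have h := cv_length p q hp hq
  intro hc
  rw [hc] at h
  have : 1 ≤ p.length := by cases p with | nil => exact absurd rfl hp | cons _ _ => simp
  have : 1 ≤ q.length := by cases q with | nil => exact absurd rfl hq | cons _ _ => simp
  simp at h
  omega

lemma cv_one_right : ∀ (p : List Int), cv p [1] = p := by
  intro p
  induction p with
  | nil => rfl
  | cons a t ih => simp [cv_cons, ragg, ih]

lemma map_scale_add (a b : Int) : ∀ (r : List Int),
    ragg (r.map (fun x => a * x)) (r.map (fun x => b * x)) = r.map (fun x => (a + b) * x) := by
  intro r
  induction r with
  | nil => rfl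
  | cons c r' ih => simp [ragg, ih, add_mul]

lemma map_scale_ragg (a : Int) : ∀ (u v : List Int),
    (ragg u v).map (fun x => a * x) = ragg (u.map (fun x => a * x)) (v.map (fun x => a * x)) := by
  intro u
  induction u with
  | nil => intro v; simp [ragg]
  | cons c u' ih =>
    intro v
    cases v with
    | nil => rfl
    | cons d v' => simp [ragg, ih, mul_add]

lemma cv_distrib_left : ∀ (u v r : List Int), cv (ragg u v) r = ragg (cv u r) (cv v r) := by
  intro u
  induction u with
  | nil => intro v r; simp [ragg, cv]
  | cons a u' ih =>
    intro v r
    cases v with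
    | nil => simp [ragg_nil_right, cv, ragg]
    | cons b v' =>
      show cv ((a + b) :: ragg u' v') r = _
      rw [cv_cons, ih v' r, cv_cons, cv_cons]
      rw [← map_scale_add a b r]
      rw [show (0 : Int) :: ragg (cv u' r) (cv v' r) = ragg (0 :: cv u' r) (0 :: cv v' r) from by
            simp [ragg]]
      rw [ragg_assoc, ← ragg_assoc (r.map fun x => b * x), ragg_comm (r.map fun x => b * x),
        ragg_assoc, ← ragg_assoc]

lemma cv_scale_left (a : Int) : ∀ (p r : List Int),
    cv (p.map (fun x => a * x)) r = (cv p r).map (fun x => a * x) := by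
  intro p
  induction p with
  | nil => intro r; rfl
  | cons c p' ih =>
    intro r
    simp only [List.map_cons, cv_cons, ih, map_scale_ragg, List.map_map]
    congr 2
    · funext x; simp [mul_assoc]
    · simp

lemma cv_single (a : Int) (q : List Int) (hq : q ≠ []) :
    cv [a] q = q.map (fun x => a * x) := by
  rw [show cv [a] q = ragg (q.map (fun x => a * x)) [0] from rfl,
    show ([0] : List Int) = List.replicate 1 0 from rfl]
  apply ragg_rep_zero_right
  simp only [List.length_map]
  cases q with | nil => exact absurd rfl hq | cons _ _ => simp

lemma cv_zero_cons (x r : List Int) (hx : x ≠ []) (hr : r ≠ []) :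
    cv (0 :: x) r = 0 :: cv x r := by
  rw [cv_cons]
  rw [show r.map (fun b => (0 : Int) * b) = List.replicate r.length 0 from by
        simp [List.map_const']]
  apply ragg_rep_zero_left
  have := cv_length x r hx hr
  have h1 : 1 ≤ x.length := by cases x with | nil => exact absurd rfl hx | cons _ _ => simp
  simp [this]
  omega

lemma cv_assoc : ∀ (p q r : List Int), q ≠ [] → r ≠ [] →
    cv (cv p q) r = cv p (cv q r) := by
  intro p
  induction p with
  | nil => intro q r _ _; rfl
  | cons a p' ih =>
    intro q r hq hr
    rw [cv_cons, cv_distrib_left]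
    rw [show q.map (fun b => a * b) = q.map (fun x => a * x) from rfl, cv_scale_left]
    cases hp' : p' with
    | nil =>
      subst hp'
      have hcv : cv q r ≠ [] := cv_ne_nil q r hq hr
      rw [show (0 : Int) :: cv ([] : List Int) q = [0] from rfl]
      rw [cv_single 0 r hr, cv_single a (cv q r) hcv]
      rw [show r.map (fun x => (0 : Int) * x) = List.replicate r.length 0 from by
            simp [List.map_const']]
      apply ragg_rep_zero_right
      simp only [List.length_map]
      rw [cv_length q r hq hr]
      have h1 : 1 ≤ q.length := by cases q with | nil => exact absurd rfl hq | cons _ _ => simp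
      have h2 : 1 ≤ r.length := by cases r with | nil => exact absurd rfl hr | cons _ _ => simp
      omega
    | cons b p'' =>
      rw [← hp']
      have hp'ne : p' ≠ [] := by rw [hp']; simp
      rw [cv_zero_cons (cv p' q) r (cv_ne_nil p' q hp'ne hq) hr]
      rw [ih q r hq hr]
      rw [cv_cons]

lemma cv_one_left (q : List Int) (hq : q ≠ []) : cv [1] q = q := by
  rw [show cv [1] q = ragg (q.map (fun b => (1:Int) * b)) [0] from rfl]
  rw [show q.map (fun b => (1:Int) * b) = q from by simp]
  rw [show ([0] : List Int) = List.replicate 1 0 from rfl]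
  apply ragg_rep_zero_right
  cases q with | nil => exact absurd rfl hq | cons _ _ => simp

-- stepB in terms of cv
lemma cv_linear (r : Int) : ∀ (t : List Int) (a : Int),
    cv (a :: t) [-r, 1] = a * (-r) :: List.zipWith (fun x y => x - r * y) (a :: t) (t ++ [0]) := by
  intro t
  induction t with
  | nil =>
    intro a
    show ragg [a * (-r), a * 1] [0] = [a * (-r), a - r * 0]
    simp [ragg]
  | cons t0 t' ih =>
    intro a
    rw [cv_cons, ih t0]
    show ragg [a * (-r), a * 1] (0 :: t0 * (-r) :: _) = _
    simp only [ragg, List.cons_append, List.zipWith_cons_cons, List.cons.injEq, add_zero]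
    exact ⟨trivial, by ring, trivial⟩

lemma stepB_eq_cv (r : Int) (c : List Int) (hc : c ≠ []) : stepB c r = cv c [-r, 1] := by
  cases c with
  | nil => exact absurd rfl hc
  | cons a t =>
    rw [cv_linear]
    show (0 - r * a) :: List.zipWith _ (a :: t) (t ++ [0]) = _
    congr 1
    ring

lemma stepB_ne_nil (c : List Int) (r : Int) : stepB c r ≠ [] := by
  unfold stepB
  cases c <;> simp

lemma fold_stepB_ne_nil : ∀ (ys : List Int) (p : List Int), p ≠ [] →
    ys.foldl stepB p ≠ [] := by
  intro ys
  induction ys with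
  | nil => intro p hp; exact hp
  | cons r ys' ih => intro p _; exact ih (stepB p r) (stepB_ne_nil p r)

lemma fold_eq_cv : ∀ (ys : List Int) (p : List Int), p ≠ [] →
    ys.foldl stepB p = cv p (ys.foldl stepB [1]) := by
  intro ys
  induction ys with
  | nil => intro p _; exact (cv_one_right p).symm
  | cons r ys' ih =>
    intro p hp
    have h1 : ys'.foldl stepB (stepB p r) = cv (stepB p r) (ys'.foldl stepB [1]) :=
      ih (stepB p r) (stepB_ne_nil p r)
    have hM : ys'.foldl stepB [1] ≠ [] := fold_stepB_ne_nil ys' [1] (by simp)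
    calc (r :: ys').foldl stepB p
        = ys'.foldl stepB (stepB p r) := rfl
      _ = cv (stepB p r) (ys'.foldl stepB [1]) := h1
      _ = cv (cv p [-r, 1]) (ys'.foldl stepB [1]) := by rw [stepB_eq_cv r p hp]
      _ = cv p (cv [-r, 1] (ys'.foldl stepB [1])) := cv_assoc p [-r, 1] _ (by simp) hM
      _ = cv p (cv (stepB [1] r) (ys'.foldl stepB [1])) := by
            rw [stepB_eq_cv r [1] (by simp)]
            rw [cv_one_left [-r, 1] (by simp)]
      _ = cv p (ys'.foldl stepB (stepB [1] r)) := by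
            rw [← ih (stepB [1] r) (stepB_ne_nil [1] r)]
      _ = cv p ((r :: ys').foldl stepB [1]) := rfl

lemma fold_stepB_append (xs ys : List Int) :
    (xs ++ ys).foldl stepB [1] = cv (xs.foldl stepB [1]) (ys.foldl stepB [1]) := by
  rw [List.foldl_append]
  exact fold_eq_cv ys (xs.foldl stepB [1]) (fold_stepB_ne_nil xs [1] (by simp))

lemma prodTreeB_eq_fold_aux : ∀ (n : Nat) (rs : List Int), rs.length ≤ n → rs ≠ [] →
    prodTreeB rs = rs.foldl stepB [1] := by
  intro n
  induction n with
  | zero =>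
    intro rs hlen hne
    cases rs with
    | nil => exact absurd rfl hne
    | cons a t => simp at hlen
  | succ n ih =>
    intro rs hlen hne
    match rs with
    | [] => exact absurd rfl hne
    | [r] =>
      rw [prodTreeB]
      simp only [List.foldl_cons, List.foldl_nil]
      rw [stepB_eq_cv r [1] (by simp), cv_one_left [-r, 1] (by simp)]
    | r1 :: r2 :: t =>
      rw [prodTreeB]
      have htake : ((r1 :: r2 :: t).take ((r1 :: r2 :: t).length / 2)).length ≤ n := by
        simp only [List.length_take, List.length_cons] at *
        omega
      have hdrop : ((r1 :: r2 :: t).drop ((r1 :: r2 :: t).length / 2)).length ≤ n := by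
        simp only [List.length_drop, List.length_cons] at *
        omega
      have htne : (r1 :: r2 :: t).take ((r1 :: r2 :: t).length / 2) ≠ [] := by
        intro h
        have := congrArg List.length h
        simp only [List.length_take, List.length_nil, List.length_cons] at this
        omega
      have hdne : (r1 :: r2 :: t).drop ((r1 :: r2 :: t).length / 2) ≠ [] := by
        intro h
        have := congrArg List.length h
        simp only [List.length_drop, List.length_nil, List.length_cons] at this
        omega
      rw [convB_eq_cv, ih _ htake htne, ih _ hdrop hdne, ← fold_stepB_append,
        List.take_append_drop]

lemma prodTreeB_eq_fold (rs : List Int) (hne : rs ≠ []) :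
    prodTreeB rs = rs.foldl stepB [1] :=
  prodTreeB_eq_fold_aux rs.length rs le_rfl hne

-- ===== VERDICT (by name: the statement is the Claim_ definition above) =====
theorem GeraPolinomio_spec : Claim_equal_GeraPolinomio := by
  intro raizes _
  unfold Spec_GeraPolinomio
  rw [A_eq_fold]
  cases raizes with
  | nil => rfl
  | cons r rs =>
    show (r :: rs).foldl stepB [1] = GeraPolinomio_alt (r :: rs)
    rw [show GeraPolinomio_alt (r :: rs) = prodTreeB (r :: rs) from rfl]
    rw [prodTreeB_eq_fold (r :: rs) (by simp)]
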